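-- pv_equiv track=rewrite | github.com/TheControlEngineer/spacecraft-setpoint-shaping | basilisk_simulation/mission_simulation.py | _infer_controller_from_control_mode
-- ===== SOURCE A (Python) =====
-- from typing import Dict, Iterable, List, Optional, Tuple
--
-- def _infer_controller_from_control_mode(control_mode: Optional[List[object]]) -> Optional[str]:
--     """Infer controller type from control mode strings."""
--     if not control_mode:
--         return None
--     modes = [str(mode) for mode in control_mode]
--     if any("AVC" in mode for mode in modes):
--         return "avc"
--     if any("FB(FILT)" in mode or "Filtered" in mode for mode in modes):
--         return "filtered_pd"
--     if any("FB(MRP)" in mode or "MRP" in mode for mode in modes):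
--         return "standard_pd"
--     return None
-- ===== SOURCE B (Python) =====
-- def _infer_controller_from_control_mode(control_mode):
--     """Infer controller type: one flag-collecting pass, then a priority decision."""
--     if not control_mode:
--         return None
--     has_avc = has_filt = has_mrp = False
--     for mode in control_mode:
--         m = str(mode)
--         if "AVC" in m:
--             has_avc = True
--         if "FB(FILT)" in m or "Filtered" in m:
--             has_filt = True
--         if "FB(MRP)" in m or "MRP" in m:
--             has_mrp = True
--     if has_avc:
--         return "avc"
--     if has_filt:
--         return "filtered_pd"
--     if has_mrp:
--         return "standard_pd"
--     return None
-- ===== Notes on version B (the rewrite author's own statement) =====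
-- stated objective: alternative
-- what changed: Replaces three sequential any()-scans over the mode list by a single flag-collecting pass followed by a priority decision (one traversal instead of up to three).
import Mathlib
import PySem

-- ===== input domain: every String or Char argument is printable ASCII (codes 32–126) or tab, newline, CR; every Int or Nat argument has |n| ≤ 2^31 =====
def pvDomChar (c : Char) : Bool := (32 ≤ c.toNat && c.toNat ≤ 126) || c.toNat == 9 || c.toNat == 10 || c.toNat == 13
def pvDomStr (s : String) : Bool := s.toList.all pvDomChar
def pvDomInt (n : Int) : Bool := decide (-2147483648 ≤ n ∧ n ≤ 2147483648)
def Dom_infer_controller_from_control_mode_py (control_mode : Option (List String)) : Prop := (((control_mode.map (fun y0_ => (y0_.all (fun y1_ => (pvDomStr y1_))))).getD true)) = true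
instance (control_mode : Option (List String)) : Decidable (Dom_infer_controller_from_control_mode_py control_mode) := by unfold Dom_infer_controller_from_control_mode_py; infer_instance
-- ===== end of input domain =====

-- B replaces A's three sequential any()-scans by one flag-collecting pass plus a priority decision.
-- ===== PORT A =====
def infer_controller_from_control_mode_py (control_mode : Option (List String)) : Option String :=
  match control_mode with
  | none => none
  | some l =>
    if l = [] then none
    else
      let modes := l.map (fun mode => mode)  -- str(mode) on str is identity
      if modes.any (fun mode => PySem.Str.isIn "AVC" mode) then some "avc"
      else if modes.any (fun mode => PySem.Str.isIn "FB(FILT)" mode || PySem.Str.isIn "Filtered" mode) then some "filtered_pd"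
      else if modes.any (fun mode => PySem.Str.isIn "FB(MRP)" mode || PySem.Str.isIn "MRP" mode) then some "standard_pd"
      else none

-- ===== PORT B =====
def infer_controller_from_control_mode_py_alt (control_mode : Option (List String)) : Option String :=
  match control_mode with
  | none => none
  | some l =>
    if l = [] then none
    else
      let flags := l.foldl (fun (st : Bool × Bool × Bool) mode =>
        let m := mode  -- str(mode) on str is identity
        ( st.1 || PySem.Str.isIn "AVC" m,
          st.2.1 || PySem.Str.isIn "FB(FILT)" m || PySem.Str.isIn "Filtered" m,
          st.2.2 || PySem.Str.isIn "FB(MRP)" m || PySem.Str.isIn "MRP" m )) (false, false, false)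
      if flags.1 then some "avc"
      else if flags.2.1 then some "filtered_pd"
      else if flags.2.2 then some "standard_pd"
      else none

-- ===== PRECONDITION & SPEC =====
def Spec_infer_controller_from_control_mode_py (control_mode : Option (List String)) (out : Option String) : Prop := out = infer_controller_from_control_mode_py_alt control_mode
instance (control_mode : Option (List String)) (out : Option String) : Decidable (Spec_infer_controller_from_control_mode_py control_mode out) := by unfold Spec_infer_controller_from_control_mode_py; infer_instance

-- ===== CLAIM (what is proved, stated in full; the proofs are below) =====
def Claim_equal_infer_controller_from_control_mode_py : Prop := ∀ (control_mode : Option (List String)), Dom_infer_controller_from_control_mode_py control_mode → Spec_infer_controller_from_control_mode_py control_mode (infer_controller_from_control_mode_py control_mode)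

-- ===== LEMMAS AND PROOFS =====
lemma pv_flags_eq (l : List String) (a b c : Bool) :
    l.foldl (fun (st : Bool × Bool × Bool) mode =>
        let m := mode
        ( st.1 || PySem.Str.isIn "AVC" m,
          st.2.1 || PySem.Str.isIn "FB(FILT)" m || PySem.Str.isIn "Filtered" m,
          st.2.2 || PySem.Str.isIn "FB(MRP)" m || PySem.Str.isIn "MRP" m )) (a, b, c)
    = ( a || l.any (fun mode => PySem.Str.isIn "AVC" mode),
        b || l.any (fun mode => PySem.Str.isIn "FB(FILT)" mode || PySem.Str.isIn "Filtered" mode),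
        c || l.any (fun mode => PySem.Str.isIn "FB(MRP)" mode || PySem.Str.isIn "MRP" mode) ) := by
  induction l generalizing a b c with
  | nil => simp
  | cons h t ih =>
    simp only [List.foldl_cons, List.any_cons, ih]
    simp [Bool.or_assoc]


-- ===== VERDICT (by name: the statement is the Claim_ definition above) =====
theorem infer_controller_from_control_mode_py_spec : Claim_equal_infer_controller_from_control_mode_py := by
  intro control_mode _
  unfold Spec_infer_controller_from_control_mode_py
  unfold infer_controller_from_control_mode_py infer_controller_from_control_mode_py_alt
  match control_mode with
  | none => rfl
  | some l =>
    simp only [pv_flags_eq, Bool.false_or, List.map_id']
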